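-- pv_equiv track=rewrite | github.com/AndreHe02/go | src/sgf/str_util.py | find_all_occ
-- ===== SOURCE A (Python) =====
-- def find_c_after(c, s, idx):
--     cur = idx - 1
--     even = True
--     while cur >= 0:
--         if s[cur] == '\\':
--             cur -= 1
--             even = not even
--         else:
--             break
--
--     for k in range(idx, len(s)):
--         if s[k] == c:
--             if even:
--                 return k
--             even = True
--         else:
--             if s[k] == '\\':
--                 even = not even
--             else:
--                 even = True
--     return -1
--
-- def find_all_occ(s, c):
--     result = []
--     cur_idx = 0
--     while cur_idx < len(s):
--         i = find_c_after(c, s, cur_idx)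
--         if i == -1:
--             break
--         result.append(i)
--         cur_idx = i + 1
--     return result
-- ===== SOURCE B (Python) =====
-- def find_all_occ(s, c):
--     result = []
--     even = True
--     for k, ch in enumerate(s):
--         if ch == c and even:
--             result.append(k)
--         even = (not even) if ch == '\\' else True
--     return result
-- ===== Notes on version B (the rewrite author's own statement) =====
-- stated objective: simpler
-- what changed: Replaces A's two-phase helper (a backward rescan of the preceding backslash run plus a forward search, re-invoked by a restart driver loop) with a single flat pass over enumerate(s) that carries the backslash-run parity in one boolean.
import Mathlib
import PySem

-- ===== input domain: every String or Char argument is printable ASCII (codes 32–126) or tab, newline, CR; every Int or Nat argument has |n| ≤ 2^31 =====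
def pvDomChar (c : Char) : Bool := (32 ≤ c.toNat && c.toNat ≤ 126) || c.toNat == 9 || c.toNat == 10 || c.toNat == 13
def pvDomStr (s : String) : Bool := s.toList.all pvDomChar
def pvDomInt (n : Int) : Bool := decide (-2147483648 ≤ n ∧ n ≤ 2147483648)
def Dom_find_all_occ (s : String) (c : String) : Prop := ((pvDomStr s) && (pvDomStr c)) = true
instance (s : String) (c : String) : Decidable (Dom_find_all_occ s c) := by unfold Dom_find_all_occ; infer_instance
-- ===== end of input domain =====

-- B replaces A's backward-rescanning helper and restart-driver with one flat scan carrying a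
-- backslash-run parity flag (simpler: one pass, no helper).

-- ===== PORT A =====
-- the backward while loop of find_c_after: `n` is cur+1 (n = 0 ⇔ cur < 0);
-- List.getD is exact here since every inspected index is in range (0 ≤ cur ≤ idx-1 < len s)
def pvBackscan (l : List Char) : Nat → Bool → Bool
  | 0, even => even
  | n + 1, even => if l.getD n ' ' = '\\' then pvBackscan l n (!even) else even

-- the forward `for k in range(idx, len(s))` loop of find_c_after, reading s[k] along the suffix
-- s[idx:]; `k` is the running index (s[k] is a 1-char string, compared to c)
def pvFscan (c : String) : List Char → Nat → Bool → Int
  | [], _, _ => -1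
  | ch :: rest, k, even =>
      if String.ofList [ch] = c then
        (if even then (k : Int) else pvFscan c rest (k + 1) true)
      else if ch = '\\' then pvFscan c rest (k + 1) (!even)
      else pvFscan c rest (k + 1) true

def pvFindCAfter (c : String) (l : List Char) (idx : Nat) : Int :=
  pvFscan c (l.drop idx) idx (pvBackscan l idx true)

-- the `while cur_idx < len(s)` loop of find_all_occ; `fuel` only totalizes the loop: it is spent
-- once per iteration, and `len s` iterations always suffice because cur_idx strictly increases
-- (find_c_after returns -1 or an index ≥ cur_idx) and the loop stops at cur_idx ≥ len s
def pvDriver (c : String) (l : List Char) : Nat → Nat → List Int → List Int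
  | 0, _, res => res
  | fuel + 1, k, res =>
      if k < l.length then
        if pvFindCAfter c l k = -1 then res
        else pvDriver c l fuel ((pvFindCAfter c l k).toNat + 1) (res ++ [pvFindCAfter c l k])
      else res

def find_all_occ (s : String) (c : String) : List Int :=
  pvDriver c s.toList s.toList.length 0 []

-- ===== PORT B =====
-- the flat `for k, ch in enumerate(s)` loop of Source B, state = (even, result accumulator)
def pvAltLoop (c : String) : List Char → Nat → Bool → List Int → List Int
  | [], _, _, acc => acc
  | ch :: rest, k, even, acc =>
      pvAltLoop c rest (k + 1) (if ch = '\\' then !even else true)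
        (if String.ofList [ch] = c ∧ even then acc ++ [(k : Int)] else acc)

def find_all_occ_alt (s : String) (c : String) : List Int :=
  pvAltLoop c s.toList 0 true []

-- ===== PRECONDITION & SPEC =====
def Spec_find_all_occ (s : String) (c : String) (out : List Int) : Prop := out = find_all_occ_alt s c
instance (s : String) (c : String) (out : List Int) : Decidable (Spec_find_all_occ s c out) := by unfold Spec_find_all_occ; infer_instance

-- ===== CLAIM (what is proved, stated in full; the proofs are below) =====
def Claim_equal_find_all_occ : Prop := ∀ (s : String) (c : String), Dom_find_all_occ s c → Spec_find_all_occ s c (find_all_occ s c)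

-- ===== LEMMAS AND PROOFS =====

-- find_c_after's forward scan returns -1 or an index j with k ≤ j < k + (length of the scanned suffix)
theorem pvFscan_range (c : String) :
    ∀ (t : List Char) (k : Nat) (e : Bool),
      pvFscan c t k e = -1 ∨
        (∃ j : Nat, pvFscan c t k e = (j : Int) ∧ k ≤ j ∧ j < k + t.length) := by
  intro t
  induction t with
  | nil => intro k e; left; rfl
  | cons ch rest ih =>
      intro k e
      simp only [pvFscan, List.length_cons]
      split_ifs with hm he hb
      · right; exact ⟨k, rfl, le_refl k, by omega⟩
      · rcases ih (k + 1) true with h | ⟨j, hj, hkj, hjl⟩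
        · left; exact h
        · right; exact ⟨j, hj, by omega, by omega⟩
      · rcases ih (k + 1) (!e) with h | ⟨j, hj, hkj, hjl⟩
        · left; exact h
        · right; exact ⟨j, hj, by omega, by omega⟩
      · rcases ih (k + 1) true with h | ⟨j, hj, hkj, hjl⟩
        · left; exact h
        · right; exact ⟨j, hj, by omega, by omega⟩

-- parity of B's flat scan after consuming the first k characters
def pvFlatpar (l : List Char) : Nat → Bool
  | 0 => true
  | k + 1 => if l.getD k ' ' = '\\' then !(pvFlatpar l k) else true

theorem pvBackscan_not (l : List Char) : ∀ n e, pvBackscan l n (!e) = !(pvBackscan l n e) := by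
  intro n
  induction n with
  | zero => intro e; rfl
  | succ n ih =>
      intro e
      simp only [pvBackscan]
      split_ifs with hb
      · exact ih (!e)
      · rfl

-- A's backward rescan always recomputes exactly B's carried parity
theorem pvBackscan_flat (l : List Char) : ∀ k, pvBackscan l k true = pvFlatpar l k := by
  intro k
  induction k with
  | zero => rfl
  | succ k ih =>
      simp only [pvBackscan, pvFlatpar]
      split_ifs with hb
      · rw [pvBackscan_not l k true, ih]
      · rfl

theorem pvAltLoop_acc (c : String) :
    ∀ (l : List Char) (k : Nat) (e : Bool) (acc : List Int),
      pvAltLoop c l k e acc = acc ++ pvAltLoop c l k e [] := by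
  intro l
  induction l with
  | nil => intro k e acc; simp [pvAltLoop]
  | cons ch rest ih =>
      intro k e acc
      simp only [pvAltLoop]
      rw [ih (k + 1) _ (if String.ofList [ch] = c ∧ e then acc ++ [(k : Int)] else acc),
          ih (k + 1) _ (if String.ofList [ch] = c ∧ e then [] ++ [(k : Int)] else [])]
      by_cases hm : String.ofList [ch] = c ∧ e <;> simp [hm]

-- one round of A's driver (one find_c_after call, started with the flat parity) versus B's flat scan
theorem pvCore (c : String) (l : List Char) :
    ∀ n k, l.length ≤ k + n →
      pvAltLoop c (l.drop k) k (pvFlatpar l k) [] =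
        (if pvFscan c (l.drop k) k (pvFlatpar l k) = -1 then []
         else pvFscan c (l.drop k) k (pvFlatpar l k) ::
           pvAltLoop c (l.drop ((pvFscan c (l.drop k) k (pvFlatpar l k)).toNat + 1))
             ((pvFscan c (l.drop k) k (pvFlatpar l k)).toNat + 1)
             (pvFlatpar l ((pvFscan c (l.drop k) k (pvFlatpar l k)).toNat + 1)) []) := by
  intro n
  induction n with
  | zero =>
      intro k h
      rw [List.drop_eq_nil_of_le (by omega)]
      rfl
  | succ n ih =>
      intro k h
      by_cases hk : k < l.length
      · have hdrop : l.drop k = l[k] :: l.drop (k + 1) := List.drop_eq_getElem_cons hk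
        have hget : l.getD k ' ' = l[k] := List.getD_eq_getElem l ' ' hk
        have h1 : pvFlatpar l (k + 1) = if l.getD k ' ' = '\\' then !(pvFlatpar l k) else true := rfl
        have hupd : (if l[k] = '\\' then !(pvFlatpar l k) else true) = pvFlatpar l (k + 1) := by
          rw [h1, hget]
        rw [hdrop]
        by_cases hm : String.ofList [l[k]] = c
        · by_cases he : pvFlatpar l k = true
          · have hfs : pvFscan c (l[k] :: l.drop (k + 1)) k (pvFlatpar l k) = (k : Int) := by
              rw [pvFscan, if_pos hm, if_pos he]
            rw [hfs, if_neg (by omega)]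
            have ht : ((k : Int)).toNat = k := rfl
            rw [ht]
            simp only [pvAltLoop]
            rw [pvAltLoop_acc c (l.drop (k + 1)) (k + 1), hupd,
                if_pos (And.intro hm he)]
            rfl
          · have he' : pvFlatpar l k = false := by simp_all
            have hfs : pvFscan c (l[k] :: l.drop (k + 1)) k (pvFlatpar l k) =
                pvFscan c (l.drop (k + 1)) (k + 1) true := by
              rw [pvFscan, if_pos hm, if_neg he]
            have hp1 : pvFlatpar l (k + 1) = true := by
              rw [← hupd, he']
              by_cases hb : l[k] = '\\'
              · rw [if_pos hb]; rfl
              · rw [if_neg hb]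
            rw [hfs]
            simp only [pvAltLoop]
            rw [pvAltLoop_acc c (l.drop (k + 1)) (k + 1), hupd,
                if_neg (fun hc => he hc.2), List.nil_append]
            have H := ih (k + 1) (by omega)
            rw [hp1] at H
            rw [hp1]
            exact H
        · have hfs : pvFscan c (l[k] :: l.drop (k + 1)) k (pvFlatpar l k) =
              pvFscan c (l.drop (k + 1)) (k + 1) (pvFlatpar l (k + 1)) := by
            rw [pvFscan, if_neg hm, ← hupd]
            by_cases hb : l[k] = '\\'
            · rw [if_pos hb, if_pos hb]
            · rw [if_neg hb, if_neg hb]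
          rw [hfs]
          simp only [pvAltLoop]
          rw [pvAltLoop_acc c (l.drop (k + 1)) (k + 1), hupd,
              if_neg (fun hc => hm hc.1), List.nil_append]
          exact ih (k + 1) (by omega)
      · rw [List.drop_eq_nil_of_le (by omega)]
        rfl

-- A's whole driver loop equals B's flat scan over the remaining suffix
theorem pvMain (c : String) (l : List Char) :
    ∀ n k res, l.length ≤ k + n →
      pvDriver c l n k res = res ++ pvAltLoop c (l.drop k) k (pvFlatpar l k) [] := by
  intro n
  induction n with
  | zero =>
      intro k res h
      rw [List.drop_eq_nil_of_le (by omega)]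
      simp [pvDriver, pvAltLoop]
  | succ n ih =>
      intro k res h
      simp only [pvDriver]
      by_cases hk : k < l.length
      · rw [if_pos hk]
        have hib : pvFindCAfter c l k = pvFscan c (l.drop k) k (pvFlatpar l k) := by
          rw [pvFindCAfter, pvBackscan_flat]
        by_cases h1 : pvFindCAfter c l k = -1
        · rw [if_pos h1, pvCore c l (n + 1) k h, ← hib, if_pos h1]
          simp
        · rw [if_neg h1]
          rcases pvFscan_range c (l.drop k) k (pvFlatpar l k) with hr | ⟨j, hj, hkj, hjl⟩
          · exact absurd (hib.trans hr) h1
          · rw [List.length_drop] at hjl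
            have hj' : (pvFindCAfter c l k).toNat = j := by rw [hib, hj]; rfl
            rw [ih ((pvFindCAfter c l k).toNat + 1) (res ++ [pvFindCAfter c l k]) (by omega),
                pvCore c l (n + 1) k h, ← hib, if_neg h1]
            simp
      · rw [if_neg hk, List.drop_eq_nil_of_le (by omega)]
        simp [pvAltLoop]

-- ===== VERDICT (by name: the statement is the Claim_ definition above) =====
theorem find_all_occ_spec : Claim_equal_find_all_occ := by
  intro s c _
  unfold Spec_find_all_occ find_all_occ find_all_occ_alt
  rw [pvMain c s.toList s.toList.length 0 [] (by omega)]
  rfl
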